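-- pv_equiv track=rewrite | github.com/k-roy/MAGESTIC | GTF_GFF_manipulation.py | combine_annotations
-- ===== SOURCE A (Python) =====
-- import operator, bedgraph_computation
--
-- def combine_annotations(sorted_sequence_type_counts, sequence_types_to_combine):
--     '''
--     takes the output of global_pA_site_distribution_by_mass,
--     which is a sorted list of tuples of (sequence type, counts)
--     and a tuple of tuples of sequence types to combine
--
--     such as :
--     sorted_sequence_type_counts = {'snoRNA':100, 'snoRNA_300_nt_downstream':200, 'snoRNA_300_nt_upstream':50}
--     sequence_types_to_combine = ( ('snoRNA', 'snoRNA_300_nt_downstream', 'snoRNA_300_nt_upstream'), ('tRNA', 'tRNA_100_nt_downstream', 'tRNA_100_nt_downstream'), ('3UTR',), ('CDS',), ('intron',), ('5UTR',), ('CUTs',), ('SUTs', 'XUTs'), ('antisense_CDS',), ('intergenic_region',) )  ## 'snRNA_300_nt_downstream', 'tRNA_100_nt_downstream', 'tRNA_100_nt_upstream'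
--
--     returns a new sorted list of (combined_sequence types, counts)
--     '''
--     combined_sequence_type_dict = {}
-- #    print sequence_types_to_combine
-- #    print sorted_sequence_type_counts
--     for sequence_types_tuple in sequence_types_to_combine:
-- #        print sequence_types_tuple
--         combined_sequence_type_dict[sequence_types_tuple] = 0
--     for sequence_type_and_counts in sorted_sequence_type_counts:
--         sequence_type, counts = sequence_type_and_counts
-- #            print sequence_type, sorted_sequence_type_counts[sequence_type]
--         for sequence_types_tuple in sequence_types_to_combine:
--             for sequence_type_tpl in sequence_types_tuple:
--                 if sequence_type == sequence_type_tpl: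
--                     combined_sequence_type_dict[sequence_types_tuple] += counts
--
-- #    print combined_sequence_type_dict
--     sorted_combined_sequence_type_counts = sorted(list(combined_sequence_type_dict.items()), key=operator.itemgetter(1))
-- #    print sorted_combined_sequence_type_counts
--     return sorted_combined_sequence_type_counts
-- ===== SOURCE B (Python) =====
-- import operator
--
-- def combine_annotations(sorted_sequence_type_counts, sequence_types_to_combine):
--     count_map = {}
--     for sequence_type, counts in sorted_sequence_type_counts:
--         count_map[sequence_type] = count_map.get(sequence_type, 0) + counts
--     combined = {}
--     for sequence_types_tuple in sequence_types_to_combine: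
--         total = 0
--         for t in sequence_types_tuple:
--             total += count_map.get(t, 0)
--         combined[sequence_types_tuple] = combined.get(sequence_types_tuple, 0) + total
--     return sorted(combined.items(), key=operator.itemgetter(1))
-- ===== Notes on version B (the rewrite author's own statement) =====
-- stated objective: faster
-- what changed: Replaces A's per-entry scan of every bucket tuple (triple nested loop) by one pass building a per-type count map, then one pass over the buckets summing looked-up totals.
import Mathlib
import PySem

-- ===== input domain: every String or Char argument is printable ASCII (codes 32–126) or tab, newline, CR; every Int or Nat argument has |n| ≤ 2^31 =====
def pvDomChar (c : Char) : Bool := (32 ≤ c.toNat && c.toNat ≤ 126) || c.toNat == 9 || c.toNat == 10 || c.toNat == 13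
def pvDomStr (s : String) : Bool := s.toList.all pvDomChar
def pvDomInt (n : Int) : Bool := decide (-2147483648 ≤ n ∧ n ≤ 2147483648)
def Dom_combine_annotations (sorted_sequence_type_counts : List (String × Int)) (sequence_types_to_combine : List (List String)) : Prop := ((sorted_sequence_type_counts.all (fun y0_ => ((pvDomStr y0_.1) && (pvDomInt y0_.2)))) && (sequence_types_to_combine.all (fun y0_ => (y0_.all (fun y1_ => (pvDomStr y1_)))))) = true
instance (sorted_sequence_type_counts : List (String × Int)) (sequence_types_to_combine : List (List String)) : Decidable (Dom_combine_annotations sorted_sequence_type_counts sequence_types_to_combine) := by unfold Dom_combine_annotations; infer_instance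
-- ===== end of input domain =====

-- B replaces A's per-entry scan over all bucket tuples by a prebuilt per-type count map
-- plus one summing pass over the buckets (objective: faster, asymptotically fewer lookups).

-- ===== PORT A =====
def combine_annotations (sorted_sequence_type_counts : List (String × Int)) (sequence_types_to_combine : List (List String)) : List (List String × Int) :=
  -- combined_sequence_type_dict = {}; for t in sequence_types_to_combine: dict[t] = 0
  let d0 : PySem.Dict (List String) Int :=
    sequence_types_to_combine.foldl (fun d tpl => d.insert tpl 0) PySem.Dict.empty
  -- for (sequence_type, counts) in sorted_sequence_type_counts:
  --   for tpl in sequence_types_to_combine: for s in tpl: if sequence_type == s: dict[tpl] += counts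
  let d1 : PySem.Dict (List String) Int :=
    sorted_sequence_type_counts.foldl (fun d p =>
      sequence_types_to_combine.foldl (fun d tpl =>
        tpl.foldl (fun d s => if p.1 == s then d.modify tpl 0 (· + p.2) else d) d) d) d0
  -- sorted(dict.items(), key=operator.itemgetter(1))
  PySem.List.sorted d1.items (fun q => q.2) false

-- ===== PORT B =====
def combine_annotations_alt (sorted_sequence_type_counts : List (String × Int)) (sequence_types_to_combine : List (List String)) : List (List String × Int) :=
  -- count_map: one pass summing counts per sequence type
  let cm : PySem.Dict String Int :=
    sorted_sequence_type_counts.foldl (fun m p => m.insert p.1 (m.getD p.1 0 + p.2)) PySem.Dict.empty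
  -- one pass over the buckets, summing looked-up totals
  let comb : PySem.Dict (List String) Int :=
    sequence_types_to_combine.foldl (fun d tpl =>
      d.insert tpl (d.getD tpl 0 + tpl.foldl (fun total s => total + cm.getD s 0) 0)) PySem.Dict.empty
  PySem.List.sorted comb.items (fun q => q.2) false

-- ===== PRECONDITION & SPEC =====
def Spec_combine_annotations (sorted_sequence_type_counts : List (String × Int)) (sequence_types_to_combine : List (List String)) (out : List (List String × Int)) : Prop := out = combine_annotations_alt sorted_sequence_type_counts sequence_types_to_combine
instance (sorted_sequence_type_counts : List (String × Int)) (sequence_types_to_combine : List (List String)) (out : List (List String × Int)) : Decidable (Spec_combine_annotations sorted_sequence_type_counts sequence_types_to_combine out) := by unfold Spec_combine_annotations; infer_instance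

-- ===== CLAIM (what is proved, stated in full; the proofs are below) =====
def Claim_equal_combine_annotations : Prop := ∀ (sorted_sequence_type_counts : List (String × Int)) (sequence_types_to_combine : List (List String)), Dom_combine_annotations sorted_sequence_type_counts sequence_types_to_combine → Spec_combine_annotations sorted_sequence_type_counts sequence_types_to_combine (combine_annotations sorted_sequence_type_counts sequence_types_to_combine)

-- ===== LEMMAS AND PROOFS =====

-- A's init loop leaves every getD-with-default-0 at 0
theorem pv_init_getD (stc : List (List String)) (d : PySem.Dict (List String) Int)
    (h : ∀ t, d.getD t 0 = 0) (t : List String) :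
    (stc.foldl (fun d tpl => d.insert tpl 0) d).getD t 0 = 0 := by
  induction stc generalizing d with
  | nil => exact h t
  | cons a l ih =>
    refine ih _ (fun t' => ?_) 
    rw [PySem.Dict.getD_insert]
    split_ifs with hh
    · rfl
    · exact h t'

-- A's innermost member loop: only key tpl changes, by (tpl-member matches of k) * c
theorem pv_member_fold (mem : List String) (tpl : List String) (k : String) (c : Int)
    (d : PySem.Dict (List String) Int) (t : List String) :
    (mem.foldl (fun d s => if k == s then d.modify tpl 0 (· + c) else d) d).getD t 0
      = d.getD t 0 + (if t = tpl then ((mem.count k : Nat) : Int) * c else 0) := by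
  induction mem generalizing d with
  | nil => simp
  | cons s l ih =>
    simp only [List.foldl_cons, List.count_cons]
    by_cases hk : (k == s) = true
    · have h' : k = s := by simpa using hk
      have hsk : (s == k) = true := by simp [h']
      rw [if_pos hk, ih, PySem.Dict.getD_modify, hsk]
      by_cases ht : t = tpl
      · subst ht
        simp only [if_pos rfl]
        push_cast
        ring
      · simp only [if_neg ht]
    · have h' : ¬ k = s := by simpa using hk
      have hsk : (s == k) = false := by
        simp only [beq_eq_false_iff_ne, ne_eq]
        exact fun h => h' h.symm
      rw [if_neg (by simp [hk]), ih, hsk]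
      simp

-- A's middle loop over all bucket tuples, for one entry (k, c)
theorem pv_entry_fold (stc : List (List String)) (k : String) (c : Int)
    (d : PySem.Dict (List String) Int) (t : List String) :
    (stc.foldl (fun d tpl =>
        tpl.foldl (fun d s => if k == s then d.modify tpl 0 (· + c) else d) d) d).getD t 0
      = d.getD t 0 + ((stc.count t : Nat) : Int) * (((t.count k : Nat) : Int) * c) := by
  induction stc generalizing d with
  | nil => simp
  | cons tpl l ih =>
    simp only [List.foldl_cons, List.count_cons, ih, pv_member_fold]
    by_cases ht : t = tpl
    · subst ht
      simp only [if_pos rfl, BEq.rfl]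
      push_cast
      ring
    · have h2 : (tpl == t) = false := by
        simp only [beq_eq_false_iff_ne, ne_eq]
        exact fun h => ht h.symm
      simp only [if_neg ht, h2]
      simp

-- A's outer loop over the entries
theorem pv_entries_fold (scs : List (String × Int)) (stc : List (List String))
    (d : PySem.Dict (List String) Int) (t : List String) :
    (scs.foldl (fun d p =>
        stc.foldl (fun d tpl =>
          tpl.foldl (fun d s => if p.1 == s then d.modify tpl 0 (· + p.2) else d) d) d) d).getD t 0
      = d.getD t 0
        + ((stc.count t : Nat) : Int)
          * (scs.map (fun p => ((t.count p.1 : Nat) : Int) * p.2)).sum := by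
  induction scs generalizing d with
  | nil => simp
  | cons p l ih =>
    simp only [List.foldl_cons, List.map_cons, List.sum_cons, ih, pv_entry_fold]
    ring

-- B's count map: getD s 0 = sum of the counts recorded for s
theorem pv_count_map (scs : List (String × Int)) (m : PySem.Dict String Int) (s : String) :
    (scs.foldl (fun m p => m.insert p.1 (m.getD p.1 0 + p.2)) m).getD s 0
      = m.getD s 0 + (scs.map (fun p => if p.1 = s then p.2 else 0)).sum := by
  induction scs generalizing m with
  | nil => simp
  | cons p l ih =>
    simp only [List.foldl_cons, List.map_cons, List.sum_cons, ih, PySem.Dict.getD_insert]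
    by_cases h : s = p.1
    · subst h
      simp only [if_pos rfl, if_pos trivial]
      ring
    · have h2 : ¬ p.1 = s := fun hh => h hh.symm
      simp only [if_neg h, if_neg h2]
      ring

-- B's bucket loop
theorem pv_bucket_fold (stc : List (List String)) (Tf : List String → Int)
    (d : PySem.Dict (List String) Int) (t : List String) :
    (stc.foldl (fun d tpl => d.insert tpl (d.getD tpl 0 + Tf tpl)) d).getD t 0
      = d.getD t 0 + ((stc.count t : Nat) : Int) * Tf t := by
  induction stc generalizing d with
  | nil => simp
  | cons tpl l ih =>
    simp only [List.foldl_cons, List.count_cons, ih, PySem.Dict.getD_insert]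
    by_cases ht : t = tpl
    · subst ht
      simp only [if_pos rfl, BEq.rfl]
      push_cast
      ring
    · have h2 : (tpl == t) = false := by
        simp only [beq_eq_false_iff_ne, ne_eq]
        exact fun h => ht h.symm
      simp only [if_neg ht, h2]
      simp

-- sum swap: per-member totals vs per-entry weighted counts
theorem pv_sum_swap (tpl : List String) (scs : List (String × Int)) :
    (tpl.map (fun s => (scs.map (fun p => if p.1 = s then p.2 else 0)).sum)).sum
      = (scs.map (fun p => ((tpl.count p.1 : Nat) : Int) * p.2)).sum := by
  induction tpl with
  | nil => simp
  | cons s l ih =>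
    simp only [List.map_cons, List.sum_cons, ih, List.count_cons]
    rw [← PySem.List.sum_map_add_int]
    refine congrArg _ (List.map_congr_left fun p _ => ?_)
    by_cases h : p.1 = s
    · have hs : (s == p.1) = true := by simp [h]
      simp only [if_pos h, hs, if_pos rfl]
      push_cast
      ring
    · have hs : (s == p.1) = false := by
        simp only [beq_eq_false_iff_ne, ne_eq]
        exact fun hh => h hh.symm
      simp only [if_neg h, hs]
      simp

-- keys invariance of A's inner member fold (modified key already present)
theorem pv_keys_member (mem : List String) (tpl : List String) (k : String) (c : Int)
    (d : PySem.Dict (List String) Int) (h : tpl ∈ d.keys) :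
    (mem.foldl (fun d s => if k == s then d.modify tpl 0 (· + c) else d) d).keys = d.keys := by
  induction mem generalizing d with
  | nil => rfl
  | cons s l ih =>
    simp only [List.foldl_cons]
    by_cases hk : (k == s) = true
    · have hkeys : (d.modify tpl 0 (· + c)).keys = d.keys := by
        rw [PySem.Dict.keys_modify, PySem.Dict.keys_insert_of_contains _ _
          ((PySem.Dict.contains_iff_mem_keys d tpl).mpr h)]
      rw [hk, if_pos rfl, ih _ (by rw [hkeys]; exact h), hkeys]
    · have hk' : (k == s) = false := by simpa using hk
      rw [hk', if_neg (by simp)]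
      exact ih d h

theorem pv_keys_entry (stc : List (List String)) (k : String) (c : Int)
    (d : PySem.Dict (List String) Int) (h : ∀ t ∈ stc, t ∈ d.keys) :
    (stc.foldl (fun d tpl =>
        tpl.foldl (fun d s => if k == s then d.modify tpl 0 (· + c) else d) d) d).keys = d.keys := by
  induction stc generalizing d with
  | nil => rfl
  | cons tpl l ih =>
    simp only [List.foldl_cons]
    have h1 := pv_keys_member tpl tpl k c d (h tpl (by simp))
    rw [ih _ (fun t ht => by rw [h1]; exact h t (by simp [ht])), h1]

theorem pv_keys_entries (scs : List (String × Int)) (stc : List (List String))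
    (d : PySem.Dict (List String) Int) (h : ∀ t ∈ stc, t ∈ d.keys) :
    (scs.foldl (fun d p =>
        stc.foldl (fun d tpl =>
          tpl.foldl (fun d s => if p.1 == s then d.modify tpl 0 (· + p.2) else d) d) d) d).keys
      = d.keys := by
  induction scs generalizing d with
  | nil => rfl
  | cons p l ih =>
    simp only [List.foldl_cons]
    have h1 := pv_keys_entry stc p.1 p.2 d h
    rw [ih _ (fun t ht => by rw [h1]; exact h t ht), h1]

-- ===== VERDICT (by name: the statement is the Claim_ definition above) =====
theorem combine_annotations_spec : Claim_equal_combine_annotations := by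
  intro scs stc _
  unfold Spec_combine_annotations combine_annotations combine_annotations_alt
  -- the two dicts have the same items list
  have hkeys0 : (stc.foldl (fun d tpl => d.insert tpl 0)
      (PySem.Dict.empty : PySem.Dict (List String) Int)).keys = PySem.Set.ofList stc := by
    rw [PySem.Dict.keys_foldl_insert stc (fun _ _ => 0), PySem.Dict.keys_empty,
      PySem.Set.update_nil_left]
  have hkeysA : (scs.foldl (fun d p =>
      stc.foldl (fun d tpl =>
        tpl.foldl (fun d s => if p.1 == s then d.modify tpl 0 (· + p.2) else d) d) d)
      (stc.foldl (fun d tpl => d.insert tpl 0) PySem.Dict.empty)).keys = PySem.Set.ofList stc := by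
    rw [pv_keys_entries scs stc _ (fun t ht => by
      rw [hkeys0]; exact (PySem.Set.mem_ofList stc t).mpr ht), hkeys0]
  have hkeysB : (stc.foldl (fun d tpl =>
      d.insert tpl (d.getD tpl 0 + tpl.foldl (fun total s =>
        total + (scs.foldl (fun m p => m.insert p.1 (m.getD p.1 0 + p.2))
          PySem.Dict.empty).getD s 0) 0)) (PySem.Dict.empty : PySem.Dict (List String) Int)).keys
      = PySem.Set.ofList stc := by
    rw [PySem.Dict.keys_foldl_insert stc _ PySem.Dict.empty, PySem.Dict.keys_empty,
      PySem.Set.update_nil_left]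
  have hgetD : ∀ t : List String,
      (scs.foldl (fun d p =>
        stc.foldl (fun d tpl =>
          tpl.foldl (fun d s => if p.1 == s then d.modify tpl 0 (· + p.2) else d) d) d)
        (stc.foldl (fun d tpl => d.insert tpl 0) PySem.Dict.empty)).getD t 0
      = (stc.foldl (fun d tpl =>
          d.insert tpl (d.getD tpl 0 + tpl.foldl (fun total s =>
            total + (scs.foldl (fun m p => m.insert p.1 (m.getD p.1 0 + p.2))
              PySem.Dict.empty).getD s 0) 0)) PySem.Dict.empty).getD t 0 := by
    intro t
    rw [pv_entries_fold, pv_init_getD stc PySem.Dict.empty (fun t => PySem.Dict.getD_empty t 0) t,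
      pv_bucket_fold, PySem.Dict.getD_empty, zero_add, zero_add]
    congr 1
    rw [PySem.List.foldl_add, zero_add]
    have : ∀ s : String,
        (scs.foldl (fun m p => m.insert p.1 (m.getD p.1 0 + p.2)) PySem.Dict.empty).getD s 0
          = (scs.map (fun p => if p.1 = s then p.2 else 0)).sum := by
      intro s; rw [pv_count_map, PySem.Dict.getD_empty, zero_add]
    rw [List.map_congr_left (fun s _ => this s), pv_sum_swap]
  have hitems :
      (scs.foldl (fun d p =>
        stc.foldl (fun d tpl =>
          tpl.foldl (fun d s => if p.1 == s then d.modify tpl 0 (· + p.2) else d) d) d)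
        (stc.foldl (fun d tpl => d.insert tpl 0) PySem.Dict.empty)).items
      = (stc.foldl (fun d tpl =>
          d.insert tpl (d.getD tpl 0 + tpl.foldl (fun total s =>
            total + (scs.foldl (fun m p => m.insert p.1 (m.getD p.1 0 + p.2))
              PySem.Dict.empty).getD s 0) 0)) PySem.Dict.empty).items := by
    rw [PySem.Dict.items_eq_map_keys _ (by rw [hkeysA]; exact PySem.Set.nodup_ofList stc) 0,
      PySem.Dict.items_eq_map_keys _ (by rw [hkeysB]; exact PySem.Set.nodup_ofList stc) 0,
      hkeysA, hkeysB]
    exact List.map_congr_left (fun t _ => by rw [hgetD t])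
  simp only [hitems]
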